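-- pv_equiv track=rewrite | github.com/Photon7777/marketing-mix-optimizer | app.py | recipient_bucket_from_title
-- ===== SOURCE A (Python) =====
-- def recipient_bucket_from_title(title: str) -> str:
--     lowered = (title or "").lower()
--     if any(token in lowered for token in ("recruit", "talent", "people", "hr")):
--         return "recruiting"
--     if any(token in lowered for token in ("cto", "chief", "co-founder", "founder", "vp", "head of")):
--         return "leadership"
--     if "manager" in lowered or "director" in lowered:
--         return "manager"
--     return "team"
-- ===== SOURCE B (Python) =====
-- TOKEN_PRIORITY = {
--     "recruit": 0, "talent": 0, "people": 0, "hr": 0,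
--     "cto": 1, "chief": 1, "co-founder": 1, "founder": 1, "vp": 1, "head of": 1,
--     "manager": 2, "director": 2,
-- }
-- BUCKETS = ("recruiting", "leadership", "manager", "team")
--
-- def recipient_bucket_from_title(title: str) -> str:
--     lowered = (title or "").lower()
--     best = 3
--     for i in range(len(lowered)):
--         for token, priority in TOKEN_PRIORITY.items():
--             if priority < best and lowered.startswith(token, i):
--                 best = priority
--     return BUCKETS[best]
-- ===== Notes on version B (the rewrite author's own statement) =====
-- stated objective: alternative
-- what changed: Instead of three ordered any-substring checks, B makes a single left-to-right scan over the positions of the lowered title, matching each token of a priority dict at each position and keeping the minimum priority found, then maps that priority to the bucket via a lookup table.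
import Mathlib
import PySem

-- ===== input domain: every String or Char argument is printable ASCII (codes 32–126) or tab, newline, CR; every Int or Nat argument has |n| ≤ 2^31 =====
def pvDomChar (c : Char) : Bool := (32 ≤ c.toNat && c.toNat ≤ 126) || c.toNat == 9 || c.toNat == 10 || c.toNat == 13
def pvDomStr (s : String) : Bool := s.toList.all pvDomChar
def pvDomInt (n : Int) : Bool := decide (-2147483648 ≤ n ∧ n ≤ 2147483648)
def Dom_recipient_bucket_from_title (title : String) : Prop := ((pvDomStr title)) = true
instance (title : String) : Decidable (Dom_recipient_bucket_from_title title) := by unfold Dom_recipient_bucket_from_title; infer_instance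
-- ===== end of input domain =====

-- B replaces A's three ordered any-substring checks by a single position scan of the lowered
-- string that keeps the minimum priority of any token matching at each position, then a table
-- lookup — an alternative algorithm of similar cost.


-- ===== PORT A =====
def recipient_bucket_from_title (title : String) : String :=
  let lowered := PySem.Str.lower (if title == "" then "" else title)
  if ["recruit", "talent", "people", "hr"].any (fun token => PySem.Str.isIn token lowered) then "recruiting"
  else if ["cto", "chief", "co-founder", "founder", "vp", "head of"].any (fun token => PySem.Str.isIn token lowered) then "leadership"
  else if PySem.Str.isIn "manager" lowered || PySem.Str.isIn "director" lowered then "manager"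
  else "team"

-- ===== PORT B =====
-- TOKEN_PRIORITY dict in insertion order
def pvTokens : List (String × Int) :=
  [("recruit", 0), ("talent", 0), ("people", 0), ("hr", 0),
   ("cto", 1), ("chief", 1), ("co-founder", 1), ("founder", 1), ("vp", 1), ("head of", 1),
   ("manager", 2), ("director", 2)]

def pvBuckets : List String := ["recruiting", "leadership", "manager", "team"]

-- inner loop: 'for token, priority in TOKEN_PRIORITY.items(): if priority < best and startswith(token, i)'
def pvBestAt (suffix : List Char) (best : Int) : Int :=
  pvTokens.foldl (fun b tp => if tp.2 < b && tp.1.toList.isPrefixOf suffix then tp.2 else b) best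

-- outer loop: 'for i in range(len(lowered))', i.e. one step per (nonempty) suffix
def pvScan : List Char → Int → Int
  | [], best => best
  | c :: rest, best => pvScan rest (pvBestAt (c :: rest) best)

def recipient_bucket_from_title_alt (title : String) : String :=
  let lowered := PySem.Str.lower (if title == "" then "" else title)
  ((PySem.List.pyGet? pvBuckets (pvScan lowered.toList 3)).getD "")

-- ===== PRECONDITION & SPEC =====
def Spec_recipient_bucket_from_title (title : String) (out : String) : Prop := out = recipient_bucket_from_title_alt title
instance (title : String) (out : String) : Decidable (Spec_recipient_bucket_from_title title out) := by unfold Spec_recipient_bucket_from_title; infer_instance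

-- ===== CLAIM (what is proved, stated in full; the proofs are below) =====
def Claim_equal_recipient_bucket_from_title : Prop := ∀ (title : String), Dom_recipient_bucket_from_title title → Spec_recipient_bucket_from_title title (recipient_bucket_from_title title)

-- ===== LEMMAS AND PROOFS =====

-- the three token groups of A, for stating the correspondence
def pvGroup : Int → List String
  | 0 => ["recruit", "talent", "people", "hr"]
  | 1 => ["cto", "chief", "co-founder", "founder", "vp", "head of"]
  | 2 => ["manager", "director"]
  | _ => []

-- pvBestAt generalized over the token list, for induction
def pvFoldB (toks : List (String × Int)) (suf : List Char) (best : Int) : Int :=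
  toks.foldl (fun b tp => if tp.2 < b && tp.1.toList.isPrefixOf suf then tp.2 else b) best

lemma pvScan_cons (c : Char) (rest : List Char) (best : Int) :
    pvScan (c :: rest) best = pvScan rest (pvFoldB pvTokens (c :: rest) best) := rfl

lemma pvFold_le_init (toks : List (String × Int)) (suf : List Char) :
    ∀ best : Int, pvFoldB toks suf best ≤ best := by
  induction toks with
  | nil => intro best; simp [pvFoldB]
  | cons hd tl ih =>
    intro best
    simp only [pvFoldB, List.foldl_cons]
    show pvFoldB tl suf _ ≤ best
    split
    · exact le_trans (ih _) (by rename_i h; simp at h; omega)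
    · exact ih best

lemma pvFold_le_mem (toks : List (String × Int)) (suf : List Char) (tp : String × Int)
    (hmem : tp ∈ toks) (hpre : tp.1.toList <+: suf) :
    ∀ best : Int, pvFoldB toks suf best ≤ tp.2 := by
  induction toks with
  | nil => cases hmem
  | cons hd tl ih =>
    intro best
    simp only [pvFoldB, List.foldl_cons]
    show pvFoldB tl suf _ ≤ tp.2
    rcases List.mem_cons.mp hmem with h | h
    · subst h
      by_cases hlt : tp.2 < best
      · rw [if_pos (by simp [hlt, List.isPrefixOf_iff_prefix, hpre])]
        exact pvFold_le_init _ _ _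
      · refine le_trans (pvFold_le_init _ _ _) ?_
        split <;> omega
    · exact ih h _

lemma pvFold_cases (toks : List (String × Int)) (suf : List Char) :
    ∀ best : Int, pvFoldB toks suf best = best ∨
      ∃ tp ∈ toks, tp.1.toList <+: suf ∧ pvFoldB toks suf best = tp.2 := by
  induction toks with
  | nil => intro best; left; rfl
  | cons hd tl ih =>
    intro best
    simp only [pvFoldB, List.foldl_cons]
    show pvFoldB tl suf _ = best ∨ ∃ tp ∈ hd :: tl, tp.1.toList <+: suf ∧ pvFoldB tl suf _ = tp.2
    split
    · rename_i h
      simp only [Bool.and_eq_true, List.isPrefixOf_iff_prefix] at h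
      rcases ih hd.2 with h2 | ⟨tp, htp, hp, he⟩
      · exact Or.inr ⟨hd, List.mem_cons_self .., h.2, h2⟩
      · exact Or.inr ⟨tp, List.mem_cons_of_mem _ htp, hp, he⟩
    · rcases ih best with h2 | ⟨tp, htp, hp, he⟩
      · exact Or.inl h2
      · exact Or.inr ⟨tp, List.mem_cons_of_mem _ htp, hp, he⟩

lemma pvScan_le_init (L : List Char) : ∀ best : Int, pvScan L best ≤ best := by
  induction L with
  | nil => intro best; simp [pvScan]
  | cons c rest ih =>
    intro best
    rw [pvScan_cons]
    exact le_trans (ih _) (pvFold_le_init _ _ _)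

lemma pv_tokens_nonempty : ∀ tp ∈ pvTokens, tp.1.toList ≠ [] := by decide

lemma pvScan_le_mem (L : List Char) (tp : String × Int) (hmem : tp ∈ pvTokens)
    (hinf : tp.1.toList <:+: L) : ∀ best : Int, pvScan L best ≤ tp.2 := by
  induction L with
  | nil =>
    exact absurd (List.eq_nil_of_infix_nil hinf) (pv_tokens_nonempty tp hmem)
  | cons c rest ih =>
    intro best
    rw [pvScan_cons]
    rcases List.infix_cons_iff.mp hinf with h | h
    · exact le_trans (pvScan_le_init rest _) (pvFold_le_mem _ _ _ hmem h best)
    · exact ih h _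

lemma pvScan_cases (L : List Char) :
    ∀ best : Int, pvScan L best = best ∨
      ∃ tp ∈ pvTokens, tp.1.toList <:+: L ∧ pvScan L best = tp.2 := by
  induction L with
  | nil => intro best; left; rfl
  | cons c rest ih =>
    intro best
    rw [pvScan_cons]
    rcases ih (pvFoldB pvTokens (c :: rest) best) with h | ⟨tp, htp, hinf, he⟩
    · rw [h]
      rcases pvFold_cases pvTokens (c :: rest) best with h2 | ⟨tp, htp, hp, he⟩
      · exact Or.inl h2
      · exact Or.inr ⟨tp, htp, hp.isInfix, he⟩
    · exact Or.inr ⟨tp, htp, hinf.trans (List.infix_cons_iff.mpr (Or.inr List.infix_rfl)), he⟩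

-- every token belongs to the group of its priority, and conversely
lemma pv_tokens_group : ∀ tp ∈ pvTokens,
    (tp.2 = 0 ∧ tp.1 ∈ pvGroup 0) ∨ (tp.2 = 1 ∧ tp.1 ∈ pvGroup 1) ∨ (tp.2 = 2 ∧ tp.1 ∈ pvGroup 2) := by
  decide

lemma pv_group_tokens0 : ∀ t ∈ pvGroup 0, (t, (0 : Int)) ∈ pvTokens := by decide
lemma pv_group_tokens1 : ∀ t ∈ pvGroup 1, (t, (1 : Int)) ∈ pvTokens := by decide
lemma pv_group_tokens2 : ∀ t ∈ pvGroup 2, (t, (2 : Int)) ∈ pvTokens := by decide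

-- group-p condition of A fires iff some token of priority p is an infix of lowered
lemma pv_cond_iff (lowered : String) (p : Int) (hp : p = 0 ∨ p = 1 ∨ p = 2) :
    (pvGroup p).any (fun token => PySem.Str.isIn token lowered) = true ↔
      ∃ tp ∈ pvTokens, tp.2 = p ∧ tp.1.toList <:+: lowered.toList := by
  constructor
  · intro h
    rcases List.any_eq_true.mp h with ⟨t, ht, hin⟩
    refine ⟨(t, p), ?_, rfl, (PySem.Str.isIn_iff_infix _ _).mp hin⟩
    rcases hp with h|h|h <;> subst h
    · exact pv_group_tokens0 t ht
    · exact pv_group_tokens1 t ht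
    · exact pv_group_tokens2 t ht
  · rintro ⟨tp, htp, hpe, hinf⟩
    refine List.any_eq_true.mpr ⟨tp.1, ?_, (PySem.Str.isIn_iff_infix _ _).mpr hinf⟩
    rcases pv_tokens_group tp htp with ⟨h1, h2⟩ | ⟨h1, h2⟩ | ⟨h1, h2⟩ <;>
      (rw [hpe] at h1; subst h1; exact h2)

-- main characterisation: the scan of lowered from 3 equals A's if-chain on the bucket index
lemma pv_scan_main (lowered : String) :
    let c := fun p => (pvGroup p).any (fun token => PySem.Str.isIn token lowered)
    pvScan lowered.toList 3 = (if c 0 then 0 else if c 1 then 1 else if c 2 then 2 else 3) := by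
  intro c
  set L := lowered.toList with hL
  have hcases := pvScan_cases L 3
  have hup : ∀ p, (p = 0 ∨ p = 1 ∨ p = 2) → c p = true → pvScan L 3 ≤ p := by
    intro p hp hc
    rcases (pv_cond_iff lowered p hp).mp hc with ⟨tp, htp, hpe, hinf⟩
    simpa [hpe] using pvScan_le_mem L tp htp hinf 3
  have hdown : ∀ p, pvScan L 3 = p → (p = 0 ∨ p = 1 ∨ p = 2) → c p = true := by
    intro p hpe hp
    rcases hcases with h | ⟨tp, htp, hinf, he⟩
    · omega
    · have : tp.2 = p := by rw [he] at hpe; exact hpe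
      exact (pv_cond_iff lowered p hp).mpr ⟨tp, htp, this, hinf⟩
  have hmem : pvScan L 3 = 3 ∨ pvScan L 3 = 0 ∨ pvScan L 3 = 1 ∨ pvScan L 3 = 2 := by
    rcases hcases with h | ⟨tp, htp, hinf, he⟩
    · exact Or.inl h
    · rcases pv_tokens_group tp htp with ⟨h1, _⟩ | ⟨h1, _⟩ | ⟨h1, _⟩ <;> rw [he, h1] <;> simp
  by_cases h0 : c 0 = true
  · have := hup 0 (by omega) h0
    rw [if_pos h0]
    rcases hmem with h|h|h|h <;> omega
  · rw [if_neg h0]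
    by_cases h1 : c 1 = true
    · have hle := hup 1 (by omega) h1
      rw [if_pos h1]
      rcases hmem with h|h|h|h
      · omega
      · exact absurd (hdown 0 h (by omega)) h0
      · omega
      · omega
    · rw [if_neg h1]
      by_cases h2 : c 2 = true
      · have hle := hup 2 (by omega) h2
        rw [if_pos h2]
        rcases hmem with h|h|h|h
        · omega
        · exact absurd (hdown 0 h (by omega)) h0
        · exact absurd (hdown 1 h (by omega)) h1
        · omega
      · rw [if_neg h2]
        rcases hmem with h|h|h|h
        · omega
        · exact absurd (hdown 0 h (by omega)) h0
        · exact absurd (hdown 1 h (by omega)) h1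
        · exact absurd (hdown 2 h (by omega)) h2

-- A's if-chain equals B's scan+lookup, for any lowered string
lemma pv_body (lowered : String) :
    (if ["recruit", "talent", "people", "hr"].any (fun token => PySem.Str.isIn token lowered) then "recruiting"
     else if ["cto", "chief", "co-founder", "founder", "vp", "head of"].any (fun token => PySem.Str.isIn token lowered) then "leadership"
     else if PySem.Str.isIn "manager" lowered || PySem.Str.isIn "director" lowered then "manager"
     else "team") = ((PySem.List.pyGet? pvBuckets (pvScan lowered.toList 3)).getD "") := by
  have hmain := pv_scan_main lowered
  simp only at hmain
  have e0 : pvGroup 0 = ["recruit", "talent", "people", "hr"] := rfl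
  have e1 : pvGroup 1 = ["cto", "chief", "co-founder", "founder", "vp", "head of"] := rfl
  have e2 : pvGroup 2 = ["manager", "director"] := rfl
  simp only [e0, e1, e2] at hmain
  have e3 : (PySem.Str.isIn "manager" lowered || PySem.Str.isIn "director" lowered)
      = ["manager", "director"].any (fun token => PySem.Str.isIn token lowered) := by
    simp only [List.any_cons, List.any_nil, Bool.or_false]
  rw [hmain, e3]
  by_cases h0 : (["recruit", "talent", "people", "hr"].any (fun token => PySem.Str.isIn token lowered)) = true
  · rw [if_pos h0, if_pos h0]; rfl
  · rw [if_neg h0, if_neg h0]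
    by_cases h1 : (["cto", "chief", "co-founder", "founder", "vp", "head of"].any (fun token => PySem.Str.isIn token lowered)) = true
    · rw [if_pos h1, if_pos h1]; rfl
    · rw [if_neg h1, if_neg h1]
      by_cases h2 : (["manager", "director"].any (fun token => PySem.Str.isIn token lowered)) = true
      · rw [if_pos h2, if_pos h2]; rfl
      · rw [if_neg h2, if_neg h2]; rfl

-- ===== VERDICT (by name: the statement is the Claim_ definition above) =====
theorem recipient_bucket_from_title_spec : Claim_equal_recipient_bucket_from_title := by
  intro title _
  unfold Spec_recipient_bucket_from_title recipient_bucket_from_title recipient_bucket_from_title_alt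
  exact pv_body (PySem.Str.lower (if title == "" then "" else title))
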